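-- pv_equiv track=rewrite | github.com/sjmoon00/problem-solving | 프로그래머스/1/72410. 신규 아이디 추천/신규 아이디 추천.py | stage4
-- ===== SOURCE A (Python) =====
-- def stage4(s: str) -> str:
--     tmp, N = [], len(s)
--     for i in range(N):
--         x = s[i]
--         if (i == 0 or i == N-1) and x == '.':
--             continue
--         tmp.append(x)
--     return ''.join(tmp)
-- ===== SOURCE B (Python) =====
-- def stage4(s: str) -> str:
--     if s[:1] == '.':
--         s = s[1:]
--     if s[-1:] == '.':
--         s = s[:-1]
--     return s
-- ===== Notes on version B (the rewrite author's own statement) =====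
-- stated objective: simpler
-- what changed: Replaces the indexed character loop that filters out boundary dots with two conditional slice operations (drop the first char if it is '.', then drop the last char if it is '.'), with no Python-level loop at all.
import Mathlib
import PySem

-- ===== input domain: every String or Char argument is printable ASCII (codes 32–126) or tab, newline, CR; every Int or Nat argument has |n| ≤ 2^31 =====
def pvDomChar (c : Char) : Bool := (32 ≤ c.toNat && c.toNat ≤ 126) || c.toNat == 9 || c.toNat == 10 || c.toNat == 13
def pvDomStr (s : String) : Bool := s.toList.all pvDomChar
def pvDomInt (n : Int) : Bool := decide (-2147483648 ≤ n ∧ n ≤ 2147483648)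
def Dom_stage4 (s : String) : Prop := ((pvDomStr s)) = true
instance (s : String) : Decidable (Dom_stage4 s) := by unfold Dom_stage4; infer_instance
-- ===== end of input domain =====

-- B replaces A's indexed character-filtering loop by two conditional slices (simpler; same cost).

-- ===== PORT A =====
-- literal port of A's loop: for i in range(N), skip s[i] when (i==0 or i==N-1) and s[i]=='.'
def stage4 (s : String) : String :=
  let l := s.toList
  let N : Int := (l.length : Int)
  let tmp := (PySem.List.enumerate l 0).foldl
    (fun acc ix => if (ix.1 = 0 ∨ ix.1 = N - 1) ∧ ix.2 = '.' then acc else acc ++ [ix.2]) []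
  String.ofList tmp

-- ===== PORT B =====
-- literal port of Source B: s = s[1:] if s[:1]=='.'; then s = s[:-1] if s[-1:]=='.'
def stage4_alt (s : String) : String :=
  let l := s.toList
  let l1 := if PySem.List.slice l none (some 1) = ['.'] then PySem.List.slice l (some 1) none else l
  let l2 := if PySem.List.slice l1 (some (-1)) none = ['.'] then PySem.List.slice l1 none (some (-1)) else l1
  String.ofList l2

-- ===== PRECONDITION & SPEC =====
def Spec_stage4 (s : String) (out : String) : Prop := out = stage4_alt s
instance (s : String) (out : String) : Decidable (Spec_stage4 s out) := by unfold Spec_stage4; infer_instance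

-- ===== CLAIM (what is proved, stated in full; the proofs are below) =====
def Claim_equal_stage4 : Prop := ∀ (s : String), Dom_stage4 s → Spec_stage4 s (stage4 s)

-- ===== LEMMAS AND PROOFS =====

-- A's loop over the tail segment m ++ [d]: every interior index is kept, the last kept iff ≠ '.'
lemma stage4_fold_mid_last (N : Int) (m : List Char) (d : Char) (s : Int) (acc : List Char)
    (h1 : 1 ≤ s) (h2 : s + m.length = N - 1) :
    (PySem.List.enumerate (m ++ [d]) s).foldl
      (fun acc ix => if (ix.1 = 0 ∨ ix.1 = N - 1) ∧ ix.2 = '.' then acc else acc ++ [ix.2]) acc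
    = acc ++ m ++ (if d = '.' then [] else [d]) := by
  induction m generalizing s acc with
  | nil =>
    simp only [List.nil_append, PySem.List.enumerate_cons, PySem.List.enumerate_nil,
      List.foldl_cons, List.foldl_nil]
    have hsN : s = N - 1 := by simpa using h2
    by_cases hd : d = '.'
    · rw [if_pos ⟨Or.inr hsN, hd⟩]; simp [hd]
    · rw [if_neg (by tauto)]; simp [hd]
  | cons a m ih =>
    simp only [List.cons_append, PySem.List.enumerate_cons, List.foldl_cons,
      List.length_cons] at *
    have hs0 : ¬ (s = 0) := by omega
    have hsN : ¬ (s = N - 1) := by push_cast at h2 ⊢; omega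
    rw [if_neg (by tauto)]
    rw [ih (s + 1) (acc ++ [a]) (by omega) (by push_cast at h2 ⊢; omega)]
    simp

-- the same equality on the underlying character lists
lemma stage4_lists (l : List Char) :
    (PySem.List.enumerate l 0).foldl
      (fun acc ix => if (ix.1 = 0 ∨ ix.1 = ((l.length : Int)) - 1) ∧ ix.2 = '.' then acc else acc ++ [ix.2]) []
    = (let l1 := if PySem.List.slice l none (some 1) = ['.'] then PySem.List.slice l (some 1) none else l
       if PySem.List.slice l1 (some (-1)) none = ['.'] then PySem.List.slice l1 none (some (-1)) else l1) := by
  rcases l with _ | ⟨c, cs⟩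
  · simp [PySem.List.enumerate_nil, PySem.List.slice]
  rcases cs.eq_nil_or_concat with rfl | ⟨m, d, rfl⟩
  · -- single character
    by_cases hc : c = '.'
    · subst hc; decide
    · have h1 : PySem.List.slice [c] none (some 1) = [c] := by
        rw [PySem.List.slice_to [c] (show (0:Int) ≤ 1 by norm_num)]; rfl
      have h2 : PySem.List.slice [c] (some (-1)) none = [c] := by
        rw [PySem.List.slice_from_neg_one]; simp
      simp [PySem.List.enumerate_cons, PySem.List.enumerate_nil, h1, h2, hc]
  · -- l = c :: m ++ [d]
    simp only [List.concat_eq_append]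
    have hN : (((c :: (m ++ [d])).length : Nat) : Int) = (m.length : Int) + 2 := by
      simp [List.length_append]; ring
    rw [hN]
    simp only [PySem.List.enumerate_cons, List.foldl_cons]
    have hs1 : PySem.List.slice (c :: (m ++ [d])) none (some 1) = [c] := by
      rw [PySem.List.slice_to (c :: (m ++ [d])) (show (0:Int) ≤ 1 by norm_num)]; rfl
    have hdropA : List.drop m.length (m ++ [d]) = [d] := by simp
    have hdropB : List.drop (m.length + 1) (c :: (m ++ [d])) = [d] := by
      simp
    have hdlB : (c :: (m ++ [d])).dropLast = c :: m := by
      have h : c :: (m ++ [d]) = (c :: m) ++ [d] := by simp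
      rw [h, List.dropLast_concat]
    have hfold := stage4_fold_mid_last ((m.length : Int) + 2) m d 1
    by_cases hc : c = '.'
    · subst hc
      rw [if_pos (by simp)]
      simp only [zero_add]
      rw [hfold [] (by omega) (by omega)]
      by_cases hd : d = '.'
      · subst hd
        simp [hs1, PySem.List.slice_from_one, PySem.List.slice_from_neg_one,
          PySem.List.slice_to_neg_one, hdropA]
      · simp [hs1, hd, PySem.List.slice_from_one, PySem.List.slice_from_neg_one,
          hdropA]
    · rw [if_neg (by simp [hc])]
      simp only [zero_add, List.nil_append]
      rw [hfold [c] (by omega) (by omega)]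
      by_cases hd : d = '.'
      · subst hd
        simp [hs1, hc, PySem.List.slice_from_neg_one, PySem.List.slice_to_neg_one,
          hdropB, hdlB]
      · simp [hs1, hc, hd, PySem.List.slice_from_neg_one, hdropB]

-- ===== VERDICT (by name: the statement is the Claim_ definition above) =====
theorem stage4_spec : Claim_equal_stage4 := by
  intro s _
  unfold Spec_stage4 stage4 stage4_alt
  simp only []
  exact congrArg String.ofList (stage4_lists s.toList)
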